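-- pv_equiv track=rewrite | github.com/sskhan67/GPGPU-Programming- | QODE/Applications/GPU-pilot/atomic_states/mol_fci.py | get_num_a_b_electrons
-- ===== SOURCE A (Python) =====
-- def get_num_a_b_electrons(ci_state, num_spatial_orbs):
-- 	num_alpha = 0
-- 	num_beta  = 0
-- 	for orb_num in ci_state:
-- 		if 0 <= orb_num < num_spatial_orbs:
-- 			num_alpha += 1
-- 		elif num_spatial_orbs <= orb_num < 2*num_spatial_orbs:
-- 			num_beta  += 1
-- 		else:
-- 			raise ValueError
-- 	return num_alpha, num_beta
-- ===== SOURCE B (Python) =====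
-- def get_num_a_b_electrons(ci_state, num_spatial_orbs):
--     orbs = list(ci_state)
--     num_alpha = sum(1 for o in orbs if 0 <= o < num_spatial_orbs)
--     num_beta = sum(1 for o in orbs if num_spatial_orbs <= o < 2 * num_spatial_orbs)
--     if num_alpha + num_beta != len(orbs):
--         raise ValueError
--     return num_alpha, num_beta
-- ===== Notes on version B (the rewrite author's own statement) =====
-- stated objective: simpler
-- what changed: Replaces the single pass with branch-and-raise by two filtered counts over the materialized list followed by a sum-equals-length validation that raises ValueError otherwise.
import Mathlib
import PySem

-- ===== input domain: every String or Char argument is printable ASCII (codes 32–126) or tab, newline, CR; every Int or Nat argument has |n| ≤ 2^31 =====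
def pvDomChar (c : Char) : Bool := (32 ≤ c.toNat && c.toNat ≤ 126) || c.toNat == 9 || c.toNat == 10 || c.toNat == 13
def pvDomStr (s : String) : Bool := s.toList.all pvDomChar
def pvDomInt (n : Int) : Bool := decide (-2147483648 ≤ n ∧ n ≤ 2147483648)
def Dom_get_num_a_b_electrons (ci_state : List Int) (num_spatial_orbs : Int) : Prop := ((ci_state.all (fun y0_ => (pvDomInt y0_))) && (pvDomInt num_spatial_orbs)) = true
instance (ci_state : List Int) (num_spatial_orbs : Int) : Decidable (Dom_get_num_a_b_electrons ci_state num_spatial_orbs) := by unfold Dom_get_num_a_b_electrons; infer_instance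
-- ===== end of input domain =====

-- B replaces A's single branch-and-raise pass with two filtered counts plus a sum==length validation (objective: simpler).


-- ===== PORT A =====
-- A's loop; `none` is exactly the ValueError of the else branch.
def pvALoop (l : List Int) (num_alpha num_beta n : Int) : Option (Int × Int) :=
  match l with
  | [] => some (num_alpha, num_beta)
  | orb_num :: rest =>
    if 0 ≤ orb_num ∧ orb_num < n then pvALoop rest (num_alpha + 1) num_beta n
    else if n ≤ orb_num ∧ orb_num < 2 * n then pvALoop rest num_alpha (num_beta + 1) n
    else none

def get_num_a_b_electrons (ci_state : List Int) (num_spatial_orbs : Int) : Int × Int :=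
  (pvALoop ci_state 0 0 num_spatial_orbs).getD (0, 0)

-- ===== PORT B =====
def get_num_a_b_electrons_alt (ci_state : List Int) (num_spatial_orbs : Int) : Int × Int :=
  let num_alpha : Int := (ci_state.filter (fun o => decide (0 ≤ o ∧ o < num_spatial_orbs))).length
  let num_beta : Int := (ci_state.filter (fun o => decide (num_spatial_orbs ≤ o ∧ o < 2 * num_spatial_orbs))).length
  if num_alpha + num_beta ≠ (ci_state.length : Int) then (0, 0)  -- ValueError in Source B; excluded by Pre_
  else (num_alpha, num_beta)

-- ===== PRECONDITION & SPEC =====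
-- Pre_ excludes exactly the inputs where A (and B) raise ValueError: some element outside [0, 2*num_spatial_orbs).
def Pre_get_num_a_b_electrons (ci_state : List Int) (num_spatial_orbs : Int) : Prop :=
  ∀ o ∈ ci_state, 0 ≤ o ∧ o < 2 * num_spatial_orbs
instance (ci_state : List Int) (num_spatial_orbs : Int) : Decidable (Pre_get_num_a_b_electrons ci_state num_spatial_orbs) := by unfold Pre_get_num_a_b_electrons; infer_instance
def pvWitness_get_num_a_b_electrons : List Int × Int := ([0, 2, 3, 1], 2)

def Spec_get_num_a_b_electrons (ci_state : List Int) (num_spatial_orbs : Int) (out : Int × Int) : Prop := out = get_num_a_b_electrons_alt ci_state num_spatial_orbs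
instance (ci_state : List Int) (num_spatial_orbs : Int) (out : Int × Int) : Decidable (Spec_get_num_a_b_electrons ci_state num_spatial_orbs out) := by unfold Spec_get_num_a_b_electrons; infer_instance

-- ===== CLAIM (what is proved, stated in full; the proofs are below) =====
def Claim_equal_get_num_a_b_electrons : Prop := ∀ (ci_state : List Int) (num_spatial_orbs : Int), Dom_get_num_a_b_electrons ci_state num_spatial_orbs → Pre_get_num_a_b_electrons ci_state num_spatial_orbs → Spec_get_num_a_b_electrons ci_state num_spatial_orbs (get_num_a_b_electrons ci_state num_spatial_orbs)

-- ===== LEMMAS AND PROOFS =====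
-- A's loop, on in-range input, adds the two filtered counts onto the accumulators.
theorem pvALoop_eq (n : Int) (l : List Int) :
    ∀ a b : Int, (∀ o ∈ l, 0 ≤ o ∧ o < 2 * n) →
    pvALoop l a b n =
      some (a + ((l.filter (fun o => decide (0 ≤ o ∧ o < n))).length : Int),
            b + ((l.filter (fun o => decide (n ≤ o ∧ o < 2 * n))).length : Int)) := by
  induction l with
  | nil => intro a b _; simp [pvALoop]
  | cons x t ih =>
    intro a b h
    have hx := h x (by simp)
    have ht : ∀ o ∈ t, 0 ≤ o ∧ o < 2 * n := fun o ho => h o (by simp [ho])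
    by_cases h1 : 0 ≤ x ∧ x < n
    · have h2 : ¬ (n ≤ x ∧ x < 2 * n) := by omega
      simp only [pvALoop]
      rw [if_pos h1, ih (a + 1) b ht, List.filter_cons, List.filter_cons,
        if_pos (decide_eq_true h1), if_neg (by simpa using h2)]
      simp only [List.length_cons]
      congr 2 <;> push_cast <;> ring
    · have h2 : n ≤ x ∧ x < 2 * n := by omega
      simp only [pvALoop]
      rw [if_neg h1, if_pos h2, ih a (b + 1) ht, List.filter_cons, List.filter_cons,
        if_neg (by simpa using h1), if_pos (decide_eq_true h2)]
      simp only [List.length_cons]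
      congr 2 <;> push_cast <;> ring

theorem filter_lengths_add (n : Int) (l : List Int) (h : ∀ o ∈ l, 0 ≤ o ∧ o < 2 * n) :
    (l.filter (fun o => decide (0 ≤ o ∧ o < n))).length
      + (l.filter (fun o => decide (n ≤ o ∧ o < 2 * n))).length = l.length := by
  induction l with
  | nil => simp
  | cons x t ih =>
    have hx := h x (by simp)
    have ht := ih (fun o ho => h o (by simp [ho]))
    rw [List.filter_cons, List.filter_cons]
    by_cases h1 : 0 ≤ x ∧ x < n
    · have h2 : ¬ (n ≤ x ∧ x < 2 * n) := by omega
      rw [if_pos (decide_eq_true h1), if_neg (by simpa using h2)]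
      simp only [List.length_cons]; omega
    · have h2 : n ≤ x ∧ x < 2 * n := by omega
      rw [if_neg (by simpa using h1), if_pos (decide_eq_true h2)]
      simp only [List.length_cons]; omega

-- ===== VERDICT (by name: the statement is the Claim_ definition above) =====
theorem get_num_a_b_electrons_spec : Claim_equal_get_num_a_b_electrons := by
  intro l n _ hpre
  unfold Spec_get_num_a_b_electrons get_num_a_b_electrons
  rw [pvALoop_eq n l 0 0 hpre]
  have hsum' : ((l.filter (fun o => decide (0 ≤ o ∧ o < n))).length : Int)
      + ((l.filter (fun o => decide (n ≤ o ∧ o < 2 * n))).length : Int) = (l.length : Int) := by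
    exact_mod_cast filter_lengths_add n l hpre
  show ((0 : Int) + _, (0 : Int) + _) = get_num_a_b_electrons_alt l n
  unfold get_num_a_b_electrons_alt
  rw [if_neg (not_not_intro hsum')]
  simp only [zero_add]
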